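-- pv_equiv track=rewrite | github.com/limkeunhyeok/daily-coding | programmers/Level_1/이상한 문자 만들기/solution.py | solution
-- ===== SOURCE A (Python) =====
-- def solution(s):
--     answer = ''
--     count = 1
--     for i in range(len(s)):
--         if s[i] != ' ' and count % 2 == 1:
--             answer += s[i].upper()
--             count += 1
--         else:
--             answer += s[i].lower()
--             count = 1
--     return answer
-- ===== SOURCE B (Python) =====
-- def solution(s):
--     return ' '.join(
--         ''.join(c.upper() if i % 2 == 0 else c.lower() for i, c in enumerate(w))
--         for w in s.split(' ')
--     )
-- ===== Notes on version B (the rewrite author's own statement) =====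
-- stated objective: idiomatic
-- what changed: Replaced A's single char-by-char pass with a mutable toggling counter by a split-on-space / per-word index-parity map / join decomposition.
import Mathlib
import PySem

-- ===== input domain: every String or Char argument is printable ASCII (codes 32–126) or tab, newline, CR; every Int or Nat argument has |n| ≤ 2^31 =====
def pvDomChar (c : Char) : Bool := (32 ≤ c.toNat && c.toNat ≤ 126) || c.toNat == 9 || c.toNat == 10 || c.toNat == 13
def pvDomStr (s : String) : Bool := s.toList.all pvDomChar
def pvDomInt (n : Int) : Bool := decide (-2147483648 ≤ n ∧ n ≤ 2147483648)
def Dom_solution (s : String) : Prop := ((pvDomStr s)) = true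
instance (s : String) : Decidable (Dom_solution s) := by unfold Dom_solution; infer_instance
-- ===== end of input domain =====

-- B replaces A's one-pass loop with a mutable toggling counter by a split(' ')/transform/join decomposition (objective: idiomatic; no speed claim).

-- ===== PORT A =====
-- one loop step: A's if/else on the current character and counter; state = (answer, count)
def solA_step (st : List Char × Int) (c : Char) : List Char × Int :=
  if c ≠ ' ' ∧ PySem.Int.mod st.2 2 = 1 then
    (st.1 ++ [PySem.Chars.upperChar c], st.2 + 1)   -- answer += s[i].upper(); count += 1
  else
    (st.1 ++ [PySem.Chars.lowerChar c], 1)          -- answer += s[i].lower(); count = 1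

def solution (s : String) : String :=
  -- for i in range(len(s)): … s[i] …  (indices are all in range, so pyGetD with a dummy default is exact)
  String.mk ((PySem.List.pyRange 0 (PySem.Str.len s) 1).foldl
    (fun st i => solA_step st (PySem.List.pyGetD s.toList i ' ')) ([], 1)).1

-- ===== PORT B =====
-- one word: ''.join(c.upper() if i % 2 == 0 else c.lower() for i, c in enumerate(w))
def solB_word (w : List Char) : List Char :=
  (PySem.List.enumerate w 0).map
    (fun p => if PySem.Int.mod p.1 2 = 0 then PySem.Chars.upperChar p.2 else PySem.Chars.lowerChar p.2)

def solution_alt (s : String) : String :=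
  -- ' '.join(… for w in s.split(' '))
  String.mk (PySem.Chars.join [' '] ((PySem.Chars.splitOn s.toList [' ']).map solB_word))

-- ===== PRECONDITION & SPEC =====
def Spec_solution (s : String) (out : String) : Prop := out = solution_alt s
instance (s : String) (out : String) : Decidable (Spec_solution s out) := by unfold Spec_solution; infer_instance

-- ===== CLAIM (what is proved, stated in full; the proofs are below) =====
def Claim_equal_solution : Prop := ∀ (s : String), Dom_solution s → Spec_solution s (solution s)

-- ===== LEMMAS AND PROOFS =====

-- the common reference function: toggle semantics of A's loop (b = "next non-space char is uppercased")
def pvG : List Char → Bool → List Char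
  | [], _ => []
  | c :: cs, b =>
    if c = ' ' then ' ' :: pvG cs true
    else (if b then PySem.Chars.upperChar c else PySem.Chars.lowerChar c) :: pvG cs (!b)

-- pure single-char split on ' ' (no accumulators), and prepending to the first group
def pvConsHead (p : List Char) : List (List Char) → List (List Char)
  | [] => [p]
  | w :: ws => (p ++ w) :: ws

def pvSp : List Char → List (List Char)
  | [] => [[]]
  | c :: rest => if c = ' ' then [] :: pvSp rest else pvConsHead [c] (pvSp rest)

lemma pvSp_ne_nil (cs : List Char) : pvSp cs ≠ [] := by
  cases cs with
  | nil => simp [pvSp]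
  | cons c rest =>
    simp only [pvSp]
    split
    · simp
    · cases h : pvSp rest <;> simp [pvConsHead]

lemma pvConsHead_consHead (a b : List Char) (ws : List (List Char)) :
    pvConsHead a (pvConsHead b ws) = pvConsHead (a ++ b) ws := by
  cases ws <;> simp [pvConsHead]

-- PySem's fuel-based splitOn.go computes pvSp
lemma pv_go_eq : ∀ (fuel : Nat) (l cur : List Char) (acc : List (List Char)),
    l.length ≤ fuel →
    PySem.Chars.splitOn.go [' '] fuel l cur acc = acc.reverse ++ pvConsHead cur.reverse (pvSp l) := by
  intro fuel
  induction fuel with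
  | zero =>
    intro l cur acc h
    have : l = [] := by cases l <;> simp_all
    subst this
    simp [PySem.Chars.splitOn.go, pvSp, pvConsHead]
  | succ fuel ih =>
    intro l cur acc h
    cases l with
    | nil => simp [PySem.Chars.splitOn.go, pvSp, pvConsHead]
    | cons c rest =>
      simp only [PySem.Chars.splitOn.go]
      by_cases hc : c = ' '
      · subst hc
        have hpre : ([' '] : List Char).isPrefixOf (' ' :: rest) = true := by
          simp [List.isPrefixOf]
        rw [if_pos hpre]
        have hdrop : List.drop ([' '] : List Char).length (' ' :: rest) = rest := rfl
        rw [hdrop]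
        rw [ih rest [] (List.reverse cur :: acc) (by simpa using Nat.le_of_succ_le_succ h)]
        obtain ⟨w, ws, hw⟩ : ∃ w ws, pvSp rest = w :: ws := by
          cases hsp : pvSp rest with
          | nil => exact absurd hsp (pvSp_ne_nil rest)
          | cons w ws => exact ⟨w, ws, rfl⟩
        simp [pvSp, hw, pvConsHead]
      · have hpre : ([' '] : List Char).isPrefixOf (c :: rest) = false := by
          simp [List.isPrefixOf]
          exact fun h' => absurd h'.symm hc
        rw [if_neg (by simp [hpre])]
        have := ih rest (c :: cur) acc (by simpa using Nat.le_of_succ_le_succ h)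
        rw [this]
        simp [pvSp, hc, List.reverse_cons, pvConsHead_consHead]

lemma pv_splitOn_eq_sp (cs : List Char) :
    PySem.Chars.splitOn cs [' '] = pvSp cs := by
  have h := pv_go_eq (cs.length + 1) cs [] [] (by omega)
  simp only [PySem.Chars.splitOn] at *
  rw [h]
  obtain ⟨w, ws, hw⟩ : ∃ w ws, pvSp cs = w :: ws := by
    cases hsp : pvSp cs with
    | nil => exact absurd hsp (pvSp_ne_nil cs)
    | cons w ws => exact ⟨w, ws, rfl⟩
  simp [hw, pvConsHead]

-- A's loop computes pvG
lemma pv_loopA : ∀ (cs acc : List Char) (count : Int),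
    (cs.foldl solA_step (acc, count)).1 = acc ++ pvG cs (decide (count % 2 = 1)) := by
  intro cs
  induction cs with
  | nil => intro acc count; simp [pvG]
  | cons c rest ih =>
    intro acc count
    have hm : PySem.Int.mod count 2 = count % 2 := PySem.Int.mod_eq_emod_of_pos (by norm_num)
    by_cases hc : c = ' '
    · subst hc
      have h1 : PySem.Chars.lowerChar ' ' = ' ' := by decide
      have hstep : solA_step (acc, count) ' ' = (acc ++ [' '], 1) := by simp [solA_step, h1]
      rw [List.foldl_cons, hstep, ih]
      simp [pvG]
    · by_cases h2 : count % 2 = 1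
      · have hstep : solA_step (acc, count) c = (acc ++ [PySem.Chars.upperChar c], count + 1) := by
          simp [solA_step, hc, h2]
        rw [List.foldl_cons, hstep, ih]
        have h3 : ¬ (count + 1) % 2 = 1 := by omega
        simp [pvG, hc, h2, h3, List.append_assoc]
      · have hstep : solA_step (acc, count) c = (acc ++ [PySem.Chars.lowerChar c], 1) := by
          simp [solA_step, h2]
        rw [List.foldl_cons, hstep, ih]
        simp [pvG, hc, h2, List.append_assoc]

-- enumerate-with-parity form of B's word map
def pvMapFrom (n : Int) (w : List Char) : List Char :=
  (PySem.List.enumerate w n).map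
    (fun p => if PySem.Int.mod p.1 2 = 0 then PySem.Chars.upperChar p.2 else PySem.Chars.lowerChar p.2)

lemma pvMapFrom_cons (n : Int) (c : Char) (w : List Char) :
    pvMapFrom n (c :: w) =
      (if PySem.Int.mod n 2 = 0 then PySem.Chars.upperChar c else PySem.Chars.lowerChar c) ::
        pvMapFrom (n + 1) w := by
  simp [pvMapFrom, PySem.List.enumerate_cons]

-- pvG with the current in-word position n equals B's per-word map, joined
lemma pv_key : ∀ (cs : List Char) (n : Nat) (w : List Char) (ws : List (List Char)),
    pvSp cs = w :: ws →
    pvG cs (decide (n % 2 = 0)) =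
      pvMapFrom (n : Int) w ++ ws.flatMap (fun v => ' ' :: pvMapFrom 0 v) := by
  intro cs
  induction cs with
  | nil =>
    intro n w ws h
    simp only [pvSp] at h
    cases h
    simp [pvG, pvMapFrom, PySem.List.enumerate]
  | cons c rest ih =>
    intro n w ws h
    by_cases hc : c = ' '
    · subst hc
      simp only [pvSp] at h
      obtain ⟨w', ws', hw⟩ : ∃ w' ws', pvSp rest = w' :: ws' := by
        cases hsp : pvSp rest with
        | nil => exact absurd hsp (pvSp_ne_nil rest)
        | cons a b => exact ⟨a, b, rfl⟩
      rw [hw] at h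
      cases h
      have := ih 0 w' ws' hw
      simp only [Nat.zero_mod, decide_true] at this
      simp [pvG, this, pvMapFrom, PySem.List.enumerate]
    · simp only [pvSp, if_neg hc] at h
      obtain ⟨w', ws', hw⟩ : ∃ w' ws', pvSp rest = w' :: ws' := by
        cases hsp : pvSp rest with
        | nil => exact absurd hsp (pvSp_ne_nil rest)
        | cons a b => exact ⟨a, b, rfl⟩
      rw [hw] at h
      simp only [pvConsHead, List.singleton_append] at h
      rw [List.cons.injEq] at h
      obtain ⟨hw1, hw2⟩ := h
      subst hw1; subst hw2
      have hIH := ih (n + 1) w' ws' hw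
      have hmod : PySem.Int.mod (n : Int) 2 = ((n % 2 : Nat) : Int) := by
        exact_mod_cast PySem.Int.mod_natCast n 2
      have hcast : ((n : Int) + 1) = ((n + 1 : Nat) : Int) := by push_cast; ring
      rw [pvMapFrom_cons, hmod, hcast, List.cons_append]
      simp only [pvG, if_neg hc]
      have hflip : (!decide (n % 2 = 0)) = decide ((n + 1) % 2 = 0) := by
        rcases Nat.mod_two_eq_zero_or_one n with h01 | h01 <;> simp [h01] <;> omega
      congr 1
      · rcases Nat.mod_two_eq_zero_or_one n with h01 | h01 <;> simp [h01]
      · rw [hflip, hIH]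

-- join over mapped words as flatMap
lemma pv_join_map_eq (f : List Char → List Char) : ∀ (ws : List (List Char)) (w : List Char),
    PySem.Chars.join [' '] ((w :: ws).map f) = f w ++ ws.flatMap (fun v => ' ' :: f v) := by
  intro ws
  induction ws with
  | nil => intro w; simp [PySem.Chars.join_singleton]
  | cons v vs ih =>
    intro w
    have h1 : List.map f (w :: v :: vs) = f w :: f v :: List.map f vs := by simp
    have h2 : f v :: List.map f vs = List.map f (v :: vs) := by simp
    rw [h1, PySem.Chars.join_cons_cons, h2, ih v]
    simp

-- ===== VERDICT (by name: the statement is the Claim_ definition above) =====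
theorem solution_spec : Claim_equal_solution := by
  intro s _
  show solution s = solution_alt s
  unfold solution solution_alt
  rw [PySem.Str.len_eq,
      PySem.List.foldl_pyRange_zero_pyGetD' s.toList ' ' solA_step (([], 1) : List Char × Int)]
  rw [pv_loopA s.toList [] 1]
  rw [pv_splitOn_eq_sp]
  obtain ⟨w, ws, hw⟩ : ∃ w ws, pvSp s.toList = w :: ws := by
    cases hsp : pvSp s.toList with
    | nil => exact absurd hsp (pvSp_ne_nil s.toList)
    | cons a b => exact ⟨a, b, rfl⟩
  rw [hw, pv_join_map_eq]
  have hkey := pv_key s.toList 0 w ws hw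
  simp only [Nat.zero_mod, decide_true, Nat.cast_zero] at hkey
  norm_num
  rw [hkey]
  rfl
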